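-- pv_equiv track=rewrite | github.com/Leapense/problems | 22397번: jfen/jfen.py | board_to_jfen
-- ===== SOURCE A (Python) =====
-- def board_to_jfen(board):
--     jfen = []
--     for row in board:
--         compressed_row = ""
--         empty_count = 0
--         for cell in row:
--             if cell == '.':
--                 empty_count += 1
--             else:
--                 if empty_count > 0:
--                     compressed_row += str(empty_count)
--                     empty_count = 0
--                 compressed_row += 'b'
--         if empty_count > 0:
--             compressed_row += str(empty_count)
--         jfen.append(compressed_row)
--     return '/'.join(jfen)
-- ===== SOURCE B (Python) =====
-- def board_to_jfen(board):
--     rows = []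
--     for row in board:
--         parts = []
--         i = 0
--         n = len(row)
--         while i < n:
--             empty = row[i] == '.'
--             j = i
--             while j < n and (row[j] == '.') == empty:
--                 j += 1
--             parts.append(str(j - i) if empty else 'b' * (j - i))
--             i = j
--         rows.append(''.join(parts))
--     return '/'.join(rows)
-- ===== Notes on version B (the rewrite author's own statement) =====
-- stated objective: alternative
-- what changed: Replaces A's stateful cell-by-cell scan with an empty_count accumulator and a flush-after-loop by a two-pointer run-grouping pass: each maximal run of equal emptiness is found at once and emitted as a whole part, then the parts are joined.
import Mathlib
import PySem

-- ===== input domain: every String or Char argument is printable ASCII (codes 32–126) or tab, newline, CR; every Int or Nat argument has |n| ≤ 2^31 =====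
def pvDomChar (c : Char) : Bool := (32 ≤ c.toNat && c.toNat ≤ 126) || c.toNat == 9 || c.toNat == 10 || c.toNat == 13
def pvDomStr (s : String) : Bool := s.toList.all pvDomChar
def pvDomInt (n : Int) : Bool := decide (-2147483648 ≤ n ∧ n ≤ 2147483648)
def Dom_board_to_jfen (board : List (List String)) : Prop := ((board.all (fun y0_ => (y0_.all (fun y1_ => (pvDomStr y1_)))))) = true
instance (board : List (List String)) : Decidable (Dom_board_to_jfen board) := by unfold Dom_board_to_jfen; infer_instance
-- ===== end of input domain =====

-- B replaces A's stateful scan (empty_count accumulator + flush) by a two-pointer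
-- run-grouping pass emitting each maximal run as a whole part (objective: alternative).

-- ===== PORT A =====
-- one cell of A's inner loop: state = (compressed_row, empty_count)
def pvStepA (st : List Char × Int) (cell : String) : List Char × Int :=
  if cell == "." then (st.1, st.2 + 1)
  else ((if st.2 > 0 then st.1 ++ PySem.Int.toChars st.2 else st.1) ++ ['b'], 0)

-- the flush after A's inner loop
def pvFinishA (st : List Char × Int) : List Char :=
  if st.2 > 0 then st.1 ++ PySem.Int.toChars st.2 else st.1

def pvRowA (row : List String) : List Char :=
  pvFinishA (row.foldl pvStepA ([], 0))

def board_to_jfen (board : List (List String)) : String :=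
  String.ofList (PySem.Chars.join ['/'] (board.map pvRowA))

-- ===== PORT B =====
-- B's inner while-loops: take the maximal run of cells of equal emptiness, emit its part, continue
def pvRowB : List String → List Char
  | [] => []
  | c :: rest =>
    let isEmpty := c == "."
    let run := (c :: rest).takeWhile (fun x => (x == ".") == isEmpty)
    let rest' := (c :: rest).dropWhile (fun x => (x == ".") == isEmpty)
    (if isEmpty then PySem.Int.toChars run.length else List.replicate run.length 'b') ++ pvRowB rest'
termination_by l => l.length
decreasing_by
  simp only [List.dropWhile]
  simp only [beq_self_eq_true]
  exact Nat.lt_succ_of_le (List.length_dropWhile_le _ _)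

def board_to_jfen_alt (board : List (List String)) : String :=
  String.ofList (PySem.Chars.join ['/'] (board.map pvRowB))

-- ===== PRECONDITION & SPEC =====
def Spec_board_to_jfen (board : List (List String)) (out : String) : Prop := out = board_to_jfen_alt board
instance (board : List (List String)) (out : String) : Decidable (Spec_board_to_jfen board out) := by unfold Spec_board_to_jfen; infer_instance

-- ===== CLAIM (what is proved, stated in full; the proofs are below) =====
def Claim_equal_board_to_jfen : Prop := ∀ (board : List (List String)), Dom_board_to_jfen board → Spec_board_to_jfen board (board_to_jfen board)

-- ===== LEMMAS AND PROOFS =====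

-- a run of dots only increments the counter
theorem pv_dotrun (run : List String) (h : ∀ c ∈ run, c = ".") (s : List Char) (k : Int) (rest : List String) :
    (run ++ rest).foldl pvStepA (s, k) = rest.foldl pvStepA (s, k + run.length) := by
  induction run generalizing k with
  | nil => simp
  | cons c tl ih =>
    have hc : c = "." := h c (by simp)
    simp only [List.cons_append, List.foldl_cons, pvStepA, hc, beq_self_eq_true, if_true]
    rw [ih (fun x hx => h x (by simp [hx]))]
    have hlen : k + 1 + (tl.length : Int) = k + ((("." :: tl).length : Nat) : Int) := by
      simp only [List.length_cons]
      push_cast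
      ring
    rw [hlen]

-- a run of non-dots starting with counter 0 appends 'b's
theorem pv_brun (run : List String) (h : ∀ c ∈ run, c ≠ ".") (s : List Char) (rest : List String) :
    (run ++ rest).foldl pvStepA (s, 0) = rest.foldl pvStepA (s ++ List.replicate run.length 'b', 0) := by
  induction run generalizing s with
  | nil => simp
  | cons c tl ih =>
    have hc : (c == ".") = false := by
      simpa using h c (by simp)
    simp only [List.cons_append, List.foldl_cons, pvStepA, hc, Bool.false_eq_true, if_false]
    have : ¬ ((0 : Int) > 0) := by omega
    rw [if_neg this, ih (fun x hx => h x (by simp [hx]))]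
    simp [List.replicate_succ]

-- flushing a positive counter before a list that is empty or starts with a non-dot
theorem pv_flush (rest : List String) (s : List Char) (k : Int) (hk : k > 0)
    (h : rest = [] ∨ ∃ d tl, rest = d :: tl ∧ d ≠ ".") :
    pvFinishA (rest.foldl pvStepA (s, k)) = pvFinishA (rest.foldl pvStepA (s ++ PySem.Int.toChars k, 0)) := by
  rcases h with h | ⟨d, tl, rfl, hd⟩
  · subst h; simp [pvFinishA, hk]
  · have hd' : (d == ".") = false := by simpa using hd
    simp [List.foldl_cons, pvStepA, hd', hk]

-- unfolds one step of pvRowB without the let bindings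
theorem pvRowB_cons (c : String) (rest : List String) :
    pvRowB (c :: rest) =
    (if (c == ".") then PySem.Int.toChars ((c :: rest).takeWhile (fun x => (x == ".") == (c == "."))).length
     else List.replicate ((c :: rest).takeWhile (fun x => (x == ".") == (c == "."))).length 'b')
    ++ pvRowB ((c :: rest).dropWhile (fun x => (x == ".") == (c == "."))) := by
  rw [pvRowB]

theorem pv_row_eq_aux : ∀ n (row : List String), row.length ≤ n → ∀ s : List Char,
    pvFinishA (row.foldl pvStepA (s, 0)) = s ++ pvRowB row := by
  intro n
  induction n with
  | zero =>
    intro row hlen s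
    have : row = [] := List.length_eq_zero_iff.mp (Nat.le_zero.mp hlen)
    subst this; simp [pvFinishA, pvRowB]
  | succ m ih =>
    intro row hlen s
    match row with
    | [] => simp [pvFinishA, pvRowB]
    | c :: rest =>
      simp only [List.length_cons] at hlen
      rw [pvRowB_cons]
      by_cases hc : c = "."
      · -- leading dot run
        have hcb : (c == ".") = true := by simpa using hc
        simp only [hcb, if_true]
        generalize hrun : (c :: rest).takeWhile (fun x => (x == ".") == true) = run
        generalize hrest' : (c :: rest).dropWhile (fun x => (x == ".") == true) = rest'
        have hsplit : run ++ rest' = c :: rest := by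
          rw [← hrun, ← hrest']; exact List.takeWhile_append_dropWhile
        have hrun_dots : ∀ x ∈ run, x = "." := by
          intro x hx
          rw [← hrun] at hx
          have := List.mem_takeWhile_imp hx
          simpa using this
        have hrun_ne : run ≠ [] := by
          rw [← hrun]
          simp [List.takeWhile, hcb]
        have hrest'_shape : rest' = [] ∨ ∃ d tl, rest' = d :: tl ∧ d ≠ "." := by
          match h : rest' with
          | [] => exact Or.inl rfl
          | d :: tl =>
            refine Or.inr ⟨d, tl, rfl, ?_⟩
            have hhd := List.head?_dropWhile_not (fun x => (x == ".") == true) (c :: rest)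
            rw [hrest'] at hhd
            simpa using hhd
        have hrun_pos : 0 < run.length := List.length_pos_iff.mpr hrun_ne
        have hlen' : rest'.length ≤ m := by
          have h1 := congrArg List.length hsplit
          simp only [List.length_append, List.length_cons] at h1
          omega
        have hkpos : (0 : Int) < run.length := by exact_mod_cast hrun_pos
        calc pvFinishA ((c :: rest).foldl pvStepA (s, 0))
            = pvFinishA ((run ++ rest').foldl pvStepA (s, 0)) := by rw [hsplit]
          _ = pvFinishA (rest'.foldl pvStepA (s, (0 : Int) + run.length)) := by rw [pv_dotrun run hrun_dots]
          _ = pvFinishA (rest'.foldl pvStepA (s ++ PySem.Int.toChars ((0 : Int) + run.length), 0)) :=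
                pv_flush rest' s _ (by omega) hrest'_shape
          _ = (s ++ PySem.Int.toChars ((0:Int) + run.length)) ++ pvRowB rest' := ih rest' hlen' _
          _ = s ++ (PySem.Int.toChars (run.length : Int) ++ pvRowB rest') := by
                rw [List.append_assoc]
                norm_num
      · -- leading non-dot run
        have hcb : (c == ".") = false := by simpa using hc
        simp only [hcb, Bool.false_eq_true, if_false]
        generalize hrun : (c :: rest).takeWhile (fun x => (x == ".") == false) = run
        generalize hrest' : (c :: rest).dropWhile (fun x => (x == ".") == false) = rest'
        have hsplit : run ++ rest' = c :: rest := by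
          rw [← hrun, ← hrest']; exact List.takeWhile_append_dropWhile
        have hrun_nd : ∀ x ∈ run, x ≠ "." := by
          intro x hx
          rw [← hrun] at hx
          have := List.mem_takeWhile_imp hx
          simpa using this
        have hrun_ne : run ≠ [] := by
          rw [← hrun]
          simp [List.takeWhile, hcb]
        have hrun_pos : 0 < run.length := List.length_pos_iff.mpr hrun_ne
        have hlen' : rest'.length ≤ m := by
          have h1 := congrArg List.length hsplit
          simp only [List.length_append, List.length_cons] at h1
          omega
        calc pvFinishA ((c :: rest).foldl pvStepA (s, 0))
            = pvFinishA ((run ++ rest').foldl pvStepA (s, 0)) := by rw [hsplit]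
          _ = pvFinishA (rest'.foldl pvStepA (s ++ List.replicate run.length 'b', 0)) := by
                rw [pv_brun run hrun_nd]
          _ = (s ++ List.replicate run.length 'b') ++ pvRowB rest' := ih rest' hlen' _
          _ = s ++ (List.replicate run.length 'b' ++ pvRowB rest') := List.append_assoc _ _ _

theorem pv_row_eq (row : List String) : pvRowA row = pvRowB row := by
  have := pv_row_eq_aux row.length row (le_refl _) []
  simpa [pvRowA] using this

-- ===== VERDICT (by name: the statement is the Claim_ definition above) =====
theorem board_to_jfen_spec : Claim_equal_board_to_jfen := by
  intro board _
  unfold Spec_board_to_jfen board_to_jfen board_to_jfen_alt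
  congr 1
  exact congrArg _ (List.map_congr_left (fun row _ => pv_row_eq row))
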